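-- pv_equiv track=rewrite | github.com/sam-jennings/Archmage | tools/optimiser/optimise.py | solve_max
-- ===== SOURCE A (Python) =====
-- from collections import defaultdict
--
-- def solve_max(
--     n: int, candidates: list[tuple[int, int, str]]
-- ) -> list[int]:
--     """Bitmask DP. Returns dp where dp[mask] is the max Recognition Points
--     achievable using only the cards whose bits are set in `mask`."""
--     total = 1 << n
--     dp = [0] * total
--
--     by_low: dict[int, list[tuple[int, int]]] = defaultdict(list)
--     for cmask, score, _t in candidates:
--         low = (cmask & -cmask).bit_length() - 1
--         by_low[low].append((cmask, score))
--
--     for mask in range(1, total):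
--         pivot = (mask & -mask).bit_length() - 1
--         best = dp[mask ^ (1 << pivot)]  # skip pivot
--         for cmask, score in by_low[pivot]:
--             if (cmask & mask) == cmask:
--                 v = dp[mask ^ cmask] + score
--                 if v > best:
--                     best = v
--         dp[mask] = best
--     return dp
-- ===== SOURCE B (Python) =====
-- def solve_max(
--     n: int, candidates: list[tuple[int, int, str]]
-- ) -> list[int]:
--     """Top-down memoized recursion over the subset lattice: best(mask) is
--     computed on demand from best of strictly smaller submasks; the dp list
--     is then just [best(mask) for mask in range(2**n)]."""
--     total = 1 << n
--
--     by_low: dict[int, list[tuple[int, int]]] = {}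
--     for cmask, score, _t in candidates:
--         low = (cmask & -cmask).bit_length() - 1
--         by_low.setdefault(low, []).append((cmask, score))
--
--     memo: dict[int, int] = {}
--
--     def best(mask: int) -> int:
--         if mask == 0:
--             return 0
--         if mask in memo:
--             return memo[mask]
--         pivot = (mask & -mask).bit_length() - 1
--         res = best(mask ^ (1 << pivot))  # skip pivot
--         for cmask, score in by_low.get(pivot, ()):
--             if (cmask & mask) == cmask:
--                 v = best(mask ^ cmask) + score
--                 if v > res:
--                     res = v
--         memo[mask] = res
--         return res
--
--     return [best(mask) for mask in range(total)]
-- ===== Notes on version B (the rewrite author's own statement) =====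
-- stated objective: alternative
-- what changed: The bottom-up for-loop that fills dp[] in increasing mask order is replaced by a top-down memoized recursion best(mask) over the subset lattice (explicit base case, memo dict instead of a pre-sized dp list), from which the result list is collected.
import Mathlib
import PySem

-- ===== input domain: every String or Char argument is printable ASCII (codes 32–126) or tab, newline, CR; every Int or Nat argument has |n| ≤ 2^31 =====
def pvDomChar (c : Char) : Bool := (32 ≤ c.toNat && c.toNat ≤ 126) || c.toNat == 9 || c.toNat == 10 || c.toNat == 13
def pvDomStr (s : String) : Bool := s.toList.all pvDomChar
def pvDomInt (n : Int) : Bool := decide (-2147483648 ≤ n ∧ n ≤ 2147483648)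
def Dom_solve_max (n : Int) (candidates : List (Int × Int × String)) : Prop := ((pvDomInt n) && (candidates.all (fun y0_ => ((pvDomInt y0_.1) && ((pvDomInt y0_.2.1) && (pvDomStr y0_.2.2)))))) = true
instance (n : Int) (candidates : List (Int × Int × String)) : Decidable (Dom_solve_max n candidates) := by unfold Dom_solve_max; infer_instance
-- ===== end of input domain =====

-- B replaces A's bottom-up increasing-mask dp loop by a top-down memoized recursion
-- over the subset lattice (same recurrence, different decomposition); equal cost.

-- ===== PORT A =====

-- (x & -x).bit_length() - 1  — the index of the lowest set bit (-1 for x = 0);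
-- this exact expression occurs in both Pythons.
def pvLowIdx (x : Int) : Int :=
  (PySem.Int.bitLength (PySem.Int.band x (-x)) : Int) - 1

-- the body of A's 'for mask in range(1, total)' loop
def pvStepA (by_low : PySem.Dict Int (List (Int × Int))) (dp : List Int) (mask : Int) :
    List Int :=
  let pivot := pvLowIdx mask
  let best := PySem.List.pyGetD dp (PySem.Int.bxor mask ((1 : Int) <<< pivot.toNat)) 0
  let best := (by_low.getD pivot []).foldl
    (fun best c =>
      if PySem.Int.band c.1 mask = c.1 then
        let v := PySem.List.pyGetD dp (PySem.Int.bxor mask c.1) 0 + c.2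
        if v > best then v else best
      else best) best
  PySem.List.pySetD dp mask best

def solve_max (n : Int) (candidates : List (Int × Int × String)) : List Int :=
  let total : Int := (1 : Int) <<< n.toNat   -- 1 << n (n < 0 raises: excluded by Pre_)
  let dp : List Int := List.replicate total.toNat 0
  let by_low : PySem.Dict Int (List (Int × Int)) :=
    candidates.foldl (fun d c => d.modify (pvLowIdx c.1) [] (· ++ [(c.1, c.2.1)]))
      PySem.Dict.empty   -- defaultdict(list) + append
  (PySem.List.pyRange 1 total 1).foldl (pvStepA by_low) dp

-- ===== PORT B =====

def pvByLowB (candidates : List (Int × Int × String)) :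
    PySem.Dict Int (List (Int × Int)) :=
  candidates.foldl (fun d c =>
    let low := pvLowIdx c.1
    let d := d.setdefault low []          -- by_low.setdefault(low, [])
    d.insert low (d.getD low [] ++ [(c.1, c.2.1)])) PySem.Dict.empty

-- Source B's recursive 'best'; the fuel argument only makes the recursion structural
-- (each recursive call strictly decreases mask, so fuel = mask suffices; the
-- fuel-0 branch is never reached — see the proofs below).
def pvBest (by_low : PySem.Dict Int (List (Int × Int))) :
    Nat → Int → PySem.Dict Int Int → Int × PySem.Dict Int Int
  | fuel, mask, memo =>
    if mask = 0 then (0, memo)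
    else
      match memo.get? mask with
      | some v => (v, memo)
      | none =>
        match fuel with
        | 0 => (0, memo)
        | fuel + 1 =>
          let pivot := pvLowIdx mask
          let sk := pvBest by_low fuel (PySem.Int.bxor mask ((1 : Int) <<< pivot.toNat)) memo
          let st := (by_low.getD pivot []).foldl
            (fun (st : Int × PySem.Dict Int Int) c =>
              if PySem.Int.band c.1 mask = c.1 then
                let r := pvBest by_low fuel (PySem.Int.bxor mask c.1) st.2
                let v := r.1 + c.2
                (if v > st.1 then v else st.1, r.2)
              else st) sk
          (st.1, st.2.insert mask st.1)

def solve_max_alt (n : Int) (candidates : List (Int × Int × String)) : List Int :=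
  let total : Int := (1 : Int) <<< n.toNat   -- 1 << n (n < 0 raises: excluded by Pre_)
  let by_low := pvByLowB candidates
  ((PySem.List.pyRange 0 total 1).foldl
    (fun (acc : List Int × PySem.Dict Int Int) mask =>
      let r := pvBest by_low mask.toNat mask acc.2
      (acc.1 ++ [r.1], r.2)) ([], PySem.Dict.empty)).1

-- ===== PRECONDITION & SPEC =====

-- Python raises on n < 0 (ValueError in 1 << n) and on n ≥ 63, where [0] * (1 << n)
-- overflows a 64-bit ssize_t (OverflowError); A returns only for 0 ≤ n < 63.
def Pre_solve_max (n : Int) (candidates : List (Int × Int × String)) : Prop := 0 ≤ n ∧ n < 63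
instance (n : Int) (candidates : List (Int × Int × String)) :
    Decidable (Pre_solve_max n candidates) := by unfold Pre_solve_max; infer_instance

def pvWitness_solve_max : Int × (List (Int × Int × String)) :=
  (3, [(1, 5, "a"), (6, 4, "bc"), (3, 7, "d")])

def Spec_solve_max (n : Int) (candidates : List (Int × Int × String)) (out : List Int) : Prop := out = solve_max_alt n candidates
instance (n : Int) (candidates : List (Int × Int × String)) (out : List Int) : Decidable (Spec_solve_max n candidates out) := by unfold Spec_solve_max; infer_instance

-- ===== CLAIM (what is proved, stated in full; the proofs are below) =====
def Claim_equal_solve_max : Prop := ∀ (n : Int) (candidates : List (Int × Int × String)), Dom_solve_max n candidates → Pre_solve_max n candidates → Spec_solve_max n candidates (solve_max n candidates)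

-- ===== LEMMAS AND PROOFS =====

-- ---- generic bit lemmas ----

theorem pv_bit_land (x y : Bool) (a b : Nat) :
    Nat.bit x a &&& Nat.bit y b = Nat.bit (x && y) (a &&& b) := by
  show Nat.bitwise and _ _ = _
  rw [Nat.bitwise_bit]; rfl

theorem pv_bit_xor (x y : Bool) (a b : Nat) :
    Nat.bit x a ^^^ Nat.bit y b = Nat.bit (Bool.xor x y) (a ^^^ b) := by
  show Nat.bitwise bne _ _ = _
  rw [Nat.bitwise_bit]; rfl

theorem pv_bit_inj {x y : Bool} {a b : Nat} (h : Nat.bit x a = Nat.bit y b) :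
    x = y ∧ a = b := by
  rw [Nat.bit_val, Nat.bit_val] at h
  cases x <;> cases y <;> simp_all <;> omega

theorem pv_xor_eq_sub (c m : Nat) (h : c &&& m = c) : m ^^^ c = m - c := by
  induction c using Nat.binaryRec generalizing m with
  | zero => simp
  | bit x a ih =>
    rcases Nat.mod_two_eq_zero_or_one m with h2 | h2
    · obtain ⟨q, rfl⟩ : ∃ q, m = 2 * q := ⟨m / 2, by omega⟩
      have hmq : 2 * q = Nat.bit false q := by rw [Nat.bit_val]; simp
      rw [hmq, pv_bit_land] at h
      obtain ⟨hx, ha⟩ := pv_bit_inj h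
      have hle : a ≤ q := ha ▸ Nat.and_le_right
      have hx' : x = false := by revert hx; cases x <;> simp
      subst hx'
      rw [hmq, pv_bit_xor, ih q ha, Nat.bit_val, Nat.bit_val]
      simp; omega
    · obtain ⟨q, rfl⟩ : ∃ q, m = 2 * q + 1 := ⟨m / 2, by omega⟩
      have hmq : 2 * q + 1 = Nat.bit true q := by rw [Nat.bit_val]; simp
      rw [hmq, pv_bit_land] at h
      obtain ⟨hx, ha⟩ := pv_bit_inj h
      have hle : a ≤ q := ha ▸ Nat.and_le_right
      rw [hmq, pv_bit_xor, ih q ha, Nat.bit_val, Nat.bit_val]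
      cases x <;> simp <;> omega

theorem pv_xor_lt (c m : Nat) (h : c &&& m = c) (hc : c ≠ 0) : m ^^^ c < m := by
  have hle : c ≤ m := h ▸ Nat.and_le_right
  rw [pv_xor_eq_sub c m h]; omega

theorem pv_lowbit_spec (m : Nat) (hm : m ≠ 0) :
    ∃ k, m - (m &&& (m - 1)) = 2 ^ k ∧ 2 ^ k &&& m = 2 ^ k := by
  induction m using Nat.strong_induction_on with
  | _ m ih =>
    rcases Nat.mod_two_eq_zero_or_one m with h2 | h2
    · obtain ⟨q, rfl⟩ : ∃ q, m = 2 * q := ⟨m / 2, by omega⟩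
      have hq : q ≠ 0 := by omega
      obtain ⟨k, hk1, hk2⟩ := ih q (by omega) hq
      have hb0 : 2 * q = Nat.bit false q := by rw [Nat.bit_val]; simp
      have hb1 : 2 * q - 1 = Nat.bit true (q - 1) := by rw [Nat.bit_val]; simp; omega
      have hand : 2 * q &&& (2 * q - 1) = 2 * (q &&& (q - 1)) := by
        rw [hb1]; conv_lhs => rw [hb0]
        rw [pv_bit_land, Nat.bit_val]; simp
      have hle : q &&& (q - 1) ≤ q := Nat.and_le_left
      refine ⟨k + 1, ?_, ?_⟩
      · rw [hand, pow_succ]; omega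
      · have hbp : (2 ^ (k + 1) : Nat) = Nat.bit false (2 ^ k) := by
          rw [Nat.bit_val]; simp [Nat.pow_succ, Nat.mul_comm]
        rw [hbp]; conv_lhs => rw [hb0]
        rw [pv_bit_land, hk2, Nat.bit_val]; simp
    · obtain ⟨q, rfl⟩ : ∃ q, m = 2 * q + 1 := ⟨m / 2, by omega⟩
      have hb1 : 2 * q + 1 = Nat.bit true q := by rw [Nat.bit_val]; simp
      have hand : (2 * q + 1) &&& (2 * q + 1 - 1) = 2 * q := by
        have : 2 * q + 1 - 1 = Nat.bit false q := by rw [Nat.bit_val]; simp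
        rw [this]; conv_lhs => rw [hb1]
        rw [pv_bit_land, Nat.bit_val]; simp
      refine ⟨0, ?_, ?_⟩
      · rw [hand]; simp
      · have h1 : (2 ^ 0 : Nat) = Nat.bit true 0 := by decide
        rw [h1]; conv_lhs => rw [hb1]
        rw [pv_bit_land]; simp

theorem pv_band_neg_self (m : Nat) (hm : m ≠ 0) :
    PySem.Int.band (m : Int) (-(m : Int)) = ((m - (m &&& (m - 1)) : Nat) : Int) := by
  have h1 : (0 : Int) ≤ (m : Int) := by positivity
  have h2 : ¬ (0 : Int) ≤ -(m : Int) := by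
    simp only [not_le]; omega
  simp only [PySem.Int.band, h1, h2, if_pos, if_false]
  have h3 : (-(-(m : Int)) - 1).toNat = m - 1 := by omega
  have h4 : ((m : Int)).toNat = m := by omega
  rw [h3, h4]

theorem pv_bitLength_two_pow (k : Nat) :
    PySem.Int.bitLength ((2 ^ k : Nat) : Int) = k + 1 := by
  have hne : ((2 ^ k : Nat) : Int) ≠ 0 := by positivity
  have h1 := PySem.Int.lt_two_pow_bitLength ((2 ^ k : Nat) : Int)
  have h2 := PySem.Int.two_pow_bitLength_le ((2 ^ k : Nat) : Int) hne
  rw [Int.natAbs_natCast] at h1 h2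
  have h3 : k < PySem.Int.bitLength ((2 ^ k : Nat) : Int) :=
    (Nat.pow_lt_pow_iff_right (by omega)).mp h1
  have h4 : PySem.Int.bitLength ((2 ^ k : Nat) : Int) - 1 ≤ k :=
    (Nat.pow_le_pow_iff_right (by omega)).mp h2
  omega

theorem pv_lowIdx_spec (m : Nat) (hm : m ≠ 0) :
    ∃ k : Nat, pvLowIdx (m : Int) = (k : Int) ∧
      PySem.Int.band (m : Int) (-(m : Int)) = ((2 ^ k : Nat) : Int) ∧
      2 ^ k &&& m = 2 ^ k := by
  obtain ⟨k, hk1, hk2⟩ := pv_lowbit_spec m hm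
  refine ⟨k, ?_, ?_, hk2⟩
  · unfold pvLowIdx
    rw [pv_band_neg_self m hm, hk1, pv_bitLength_two_pow]
    push_cast; ring
  · rw [pv_band_neg_self m hm, hk1]

theorem pv_lowIdx_zero : pvLowIdx 0 = -1 := by decide

theorem pv_guard_spec (c : Int) (m k : Nat) (hg : PySem.Int.band c (m : Int) = c)
    (hl : pvLowIdx c = (k : Int)) :
    ∃ cn : Nat, c = (cn : Int) ∧ cn ≠ 0 ∧ cn &&& m = cn := by
  have hc0 : 0 ≤ c := by
    rw [← hg, PySem.Int.band_comm]
    exact PySem.Int.band_nonneg_of_nonneg_left c (by positivity)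
  refine ⟨c.toNat, by omega, ?_, ?_⟩
  · intro h0
    have : c = 0 := by omega
    rw [this, pv_lowIdx_zero] at hl
    omega
  · have hc : c = ((c.toNat : Nat) : Int) := by omega
    rw [hc, PySem.Int.band_natCast] at hg
    exact_mod_cast hg

-- ---- by_low ----

-- B's setdefault-then-overwrite step is A's defaultdict modify step
theorem pv_setdefault_insert (d : PySem.Dict Int (List (Int × Int))) (k : Int)
    (x : Int × Int) :
    (d.setdefault k []).insert k ((d.setdefault k []).getD k [] ++ [x]) =
      d.modify k [] (· ++ [x]) := by
  by_cases hc : d.contains k = true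
  · simp [PySem.Dict.setdefault, hc, PySem.Dict.modify]
  · have hcf : d.contains k = false := by simpa using hc
    have hall : ∀ p ∈ d.items, (p.1 == k) = false := by
      intro p hp
      have h := hcf
      simp [PySem.Dict.contains] at h
      simpa using h p.1 p.2 hp
    have hfind : d.items.find? (fun p => p.1 == k) = none :=
      List.find?_eq_none.mpr (fun p hp => by simp [hall p hp])
    have hsd : d.setdefault k [] = PySem.Dict.mk (d.items ++ [(k, [])]) := by
      simp [PySem.Dict.setdefault, hcf]
    have hget : (PySem.Dict.mk (d.items ++ [(k, ([] : List (Int × Int)))])).getD k [] = [] := by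
      simp [PySem.Dict.getD, PySem.Dict.get?, List.find?_append, hfind]
    have hcon : (PySem.Dict.mk (d.items ++ [(k, ([] : List (Int × Int)))])).contains k = true := by
      simp [PySem.Dict.contains]
    rw [hsd, hget]
    have hmap : d.items.map (fun p => if p.1 = k then (k, [x]) else p) = d.items := by
      conv_rhs => rw [← List.map_id d.items]
      apply List.map_congr_left
      intro p hp
      have h := hall p hp
      simp at h
      simp [h]
    simp only [PySem.Dict.insert, PySem.Dict.modify, hcon, if_true,
      PySem.Dict.getD_of_not_contains d ([] : List (Int × Int)) hcf, hcf]
    simp [List.map_append, hmap]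

theorem pv_byLowB_eq (candidates : List (Int × Int × String)) :
    pvByLowB candidates =
      candidates.foldl (fun d c => d.modify (pvLowIdx c.1) [] (· ++ [(c.1, c.2.1)]))
        PySem.Dict.empty := by
  unfold pvByLowB
  have hf : (fun (d : PySem.Dict Int (List (Int × Int))) (c : Int × Int × String) =>
      let low := pvLowIdx c.1
      let d' := d.setdefault low []
      d'.insert low (d'.getD low [] ++ [(c.1, c.2.1)])) =
      (fun d c => d.modify (pvLowIdx c.1) [] (· ++ [(c.1, c.2.1)])) := by
    funext d c
    exact pv_setdefault_insert d (pvLowIdx c.1) (c.1, c.2.1)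
  rw [hf]

theorem pv_mem_byLow_aux (l : List (Int × Int × String))
    (d : PySem.Dict Int (List (Int × Int))) (p : Int) (q : Int × Int)
    (hinv : ∀ q' ∈ d.getD p [], pvLowIdx q'.1 = p)
    (hq : q ∈ (l.foldl
        (fun d c => d.modify (pvLowIdx c.1) [] (· ++ [(c.1, c.2.1)])) d).getD p []) :
    pvLowIdx q.1 = p := by
  induction l generalizing d with
  | nil => exact hinv q hq
  | cons c l ih =>
    refine ih (d.modify (pvLowIdx c.1) [] (· ++ [(c.1, c.2.1)])) ?_ hq
    intro q' hq'
    rw [PySem.Dict.getD_modify] at hq'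
    by_cases hp : p = pvLowIdx c.1
    · rw [if_pos hp] at hq'
      rcases List.mem_append.mp hq' with h | h
      · exact hinv q' (hp ▸ h)
      · simp at h; rw [h]; exact hp.symm
    · rw [if_neg hp] at hq'
      exact hinv q' hq'

theorem pv_mem_byLow (candidates : List (Int × Int × String)) (p : Int)
    (q : Int × Int)
    (hq : q ∈ (candidates.foldl
        (fun d c => d.modify (pvLowIdx c.1) [] (· ++ [(c.1, c.2.1)]))
        PySem.Dict.empty).getD p []) :
    pvLowIdx q.1 = p := by
  refine pv_mem_byLow_aux candidates PySem.Dict.empty p q ?_ hq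
  intro q' hq'
  simp [PySem.Dict.getD_empty] at hq'


-- ---- A-side: the dp array satisfies its own recurrence ----

def pvY (candidates : List (Int × Int × String)) : PySem.Dict Int (List (Int × Int)) :=
  candidates.foldl (fun d c => d.modify (pvLowIdx c.1) [] (· ++ [(c.1, c.2.1)]))
    PySem.Dict.empty

def pvT (n : Int) : Nat := 2 ^ n.toNat

def pvStepVal (Y : PySem.Dict Int (List (Int × Int))) (dp : List Int) (mask : Int) : Int :=
  (Y.getD (pvLowIdx mask) []).foldl
    (fun best c =>
      if PySem.Int.band c.1 mask = c.1 then
        let v := PySem.List.pyGetD dp (PySem.Int.bxor mask c.1) 0 + c.2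
        if v > best then v else best
      else best)
    (PySem.List.pyGetD dp (PySem.Int.bxor mask ((1 : Int) <<< (pvLowIdx mask).toNat)) 0)

theorem pvStepA_eq (Y : PySem.Dict Int (List (Int × Int))) (dp : List Int) (mask : Int) :
    pvStepA Y dp mask = PySem.List.pySetD dp mask (pvStepVal Y dp mask) := rfl

def pvDk (n : Int) (candidates : List (Int × Int × String)) (k : Nat) : List Int :=
  (PySem.List.pyRange 1 (k : Int) 1).foldl (pvStepA (pvY candidates))
    (List.replicate (pvT n) 0)

theorem pv_length_foldl (Y : PySem.Dict Int (List (Int × Int))) (L : List Int)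
    (dp : List Int) : (L.foldl (pvStepA Y) dp).length = dp.length := by
  induction L generalizing dp with
  | nil => rfl
  | cons a L ih => rw [List.foldl_cons, ih, pvStepA_eq, PySem.List.length_pySetD]

theorem pv_length_pvDk (n : Int) (candidates : List (Int × Int × String)) (k : Nat) :
    (pvDk n candidates k).length = pvT n := by
  rw [pvDk, pv_length_foldl, List.length_replicate]

theorem pvDk_succ (n : Int) (candidates : List (Int × Int × String)) (k : Nat)
    (hk : 1 ≤ k) :
    pvDk n candidates (k + 1) = pvStepA (pvY candidates) (pvDk n candidates k) (k : Int) := by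
  unfold pvDk
  have hcast : ((k + 1 : Nat) : Int) = (k : Int) + 1 := by push_cast; ring
  rw [hcast, PySem.List.pyRange_one_succ_right (by exact_mod_cast hk), List.foldl_append]
  rfl

theorem pvDk_one (n : Int) (candidates : List (Int × Int × String)) :
    pvDk n candidates 1 = List.replicate (pvT n) 0 := by
  unfold pvDk
  rw [PySem.List.pyRange_one_eq_nil (by norm_num)]
  rfl

theorem pv_getD_stepA_ne (Y : PySem.Dict Int (List (Int × Int))) (dp : List Int)
    (m j : Nat) (hne : m ≠ j) :
    (pvStepA Y dp (m : Int)).getD j 0 = dp.getD j 0 := by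
  rw [pvStepA_eq, PySem.List.pySetD_natCast, List.getD_eq_getElem?_getD,
    List.getElem?_set_ne hne, ← List.getD_eq_getElem?_getD]

theorem pv_stab (n : Int) (candidates : List (Int × Int × String)) (j k k' : Nat)
    (h1 : j < k) (h2 : k ≤ k') :
    (pvDk n candidates k').getD j 0 = (pvDk n candidates k).getD j 0 := by
  induction k' with
  | zero => omega
  | succ k' ih =>
    rcases Nat.lt_or_ge k' k with h | h
    · have : k = k' + 1 := by omega
      rw [this]
    · have hk1 : 1 ≤ k' := by omega
      rw [pvDk_succ n candidates k' hk1, pv_getD_stepA_ne _ _ _ _ (by omega), ih (by omega)]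

theorem pv_agree_below (n : Int) (candidates : List (Int × Int × String)) (i j : Nat)
    (hij : i < j) (hjT : j ≤ pvT n) :
    (pvDk n candidates j).getD i 0 = (pvDk n candidates (pvT n)).getD i 0 := by
  rw [pv_stab n candidates i (i + 1) j (by omega) (by omega),
    pv_stab n candidates i (i + 1) (pvT n) (by omega) (by omega)]

theorem pv_shl_one (k : Nat) : (1 : Int) <<< k = ((2 ^ k : Nat) : Int) := by
  rw [Int.shiftLeft_eq]; push_cast; ring

theorem pv_solve_max_eq (n : Int) (candidates : List (Int × Int × String)) :
    solve_max n candidates = pvDk n candidates (pvT n) := by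
  simp only [solve_max, pvDk, pvY, pvT, pv_shl_one, Int.toNat_natCast]

theorem pv_out_length (n : Int) (candidates : List (Int × Int × String)) :
    (solve_max n candidates).length = pvT n := by
  rw [pv_solve_max_eq, pv_length_pvDk]

theorem pv_T_pos (n : Int) : 1 ≤ pvT n := Nat.one_le_two_pow

theorem pv_out_zero (n : Int) (candidates : List (Int × Int × String)) :
    (solve_max n candidates).getD 0 0 = 0 := by
  rw [pv_solve_max_eq,
    pv_stab n candidates 0 1 (pvT n) (by omega) (pv_T_pos n), pvDk_one,
    List.getD_replicate _ (pv_T_pos n)]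

theorem pv_read_index (m k : Nat) (hl : pvLowIdx (m : Int) = (k : Int)) :
    PySem.Int.bxor (m : Int) ((1 : Int) <<< (pvLowIdx (m : Int)).toNat) =
      ((m ^^^ 2 ^ k : Nat) : Int) := by
  rw [hl, Int.toNat_natCast, pv_shl_one, PySem.Int.bxor_natCast]

theorem pv_getD_stepA_self (Y : PySem.Dict Int (List (Int × Int))) (dp : List Int)
    (m : Nat) (hm : m < dp.length) :
    (pvStepA Y dp (m : Int)).getD m 0 = pvStepVal Y dp (m : Int) := by
  rw [pvStepA_eq, PySem.List.pySetD_natCast, List.getD_eq_getElem?_getD,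
    List.getElem?_set_self hm, Option.getD_some]

theorem pv_rec (n : Int) (candidates : List (Int × Int × String)) (j : Nat)
    (h1 : 1 ≤ j) (h2 : j < pvT n) :
    (solve_max n candidates).getD j 0 =
      pvStepVal (pvY candidates) (solve_max n candidates) (j : Int) := by
  obtain ⟨k, hpiv, hband, hsub⟩ := pv_lowIdx_spec j (by omega)
  have hpk : (2 : Nat) ^ k ≠ 0 := by positivity
  have hxk : j ^^^ 2 ^ k < j := pv_xor_lt _ _ hsub hpk
  have hstep : (solve_max n candidates).getD j 0 =
      pvStepVal (pvY candidates) (pvDk n candidates j) (j : Int) := by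
    rw [pv_solve_max_eq,
      pv_stab n candidates j (j + 1) (pvT n) (by omega) (by omega),
      pvDk_succ n candidates j h1,
      pv_getD_stepA_self _ _ _ (by rw [pv_length_pvDk]; omega)]
  rw [hstep]
  unfold pvStepVal
  have hinit : PySem.List.pyGetD (pvDk n candidates j)
      (PySem.Int.bxor (j : Int) ((1 : Int) <<< (pvLowIdx (j : Int)).toNat)) 0 =
      PySem.List.pyGetD (solve_max n candidates)
      (PySem.Int.bxor (j : Int) ((1 : Int) <<< (pvLowIdx (j : Int)).toNat)) 0 := by
    rw [pv_read_index j k hpiv, PySem.List.pyGetD_natCast, PySem.List.pyGetD_natCast,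
      pv_solve_max_eq, pv_agree_below n candidates _ j hxk (by omega)]
  rw [hinit]
  apply PySem.List.foldl_congr_mem'
  intro c hc acc
  have hlow : pvLowIdx c.1 = pvLowIdx (j : Int) := pv_mem_byLow candidates _ c hc
  by_cases hg : PySem.Int.band c.1 (j : Int) = c.1
  · rw [if_pos hg, if_pos hg]
    obtain ⟨cn, hceq, hcn0, hcnsub⟩ := pv_guard_spec c.1 j k hg (hlow.trans hpiv)
    have hxc : j ^^^ cn < j := pv_xor_lt cn j hcnsub hcn0
    have hread : PySem.List.pyGetD (pvDk n candidates j) (PySem.Int.bxor (j : Int) c.1) 0 =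
        PySem.List.pyGetD (solve_max n candidates) (PySem.Int.bxor (j : Int) c.1) 0 := by
      rw [hceq, PySem.Int.bxor_natCast, PySem.List.pyGetD_natCast, PySem.List.pyGetD_natCast,
        pv_solve_max_eq, pv_agree_below n candidates _ j hxc (by omega)]
    rw [hread]
  · rw [if_neg hg, if_neg hg]

-- ---- B-side: the memoized recursion computes A's dp values ----

def pvInv (T : Nat) (out : List Int) (memo : PySem.Dict Int Int) : Prop :=
  ∀ kk v, memo.get? kk = some v → ∃ j : Nat, kk = (j : Int) ∧ j < T ∧ v = out.getD j 0

theorem pv_fold_spec (Y : PySem.Dict Int (List (Int × Int))) (T : Nat) (out : List Int)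
    (fuel : Nat)
    (IH : ∀ (m' : Nat) (memo : PySem.Dict Int Int), m' < T → m' ≤ fuel →
      pvInv T out memo →
      (pvBest Y fuel (m' : Int) memo).1 = out.getD m' 0 ∧
        pvInv T out (pvBest Y fuel (m' : Int) memo).2)
    (m k : Nat) (hmT : m < T) (hmf : m ≤ fuel + 1)
    (L : List (Int × Int)) (hL : ∀ c ∈ L, pvLowIdx c.1 = (k : Int)) :
    ∀ (st : Int × PySem.Dict Int Int), pvInv T out st.2 →
      (L.foldl (fun (st : Int × PySem.Dict Int Int) c =>
          if PySem.Int.band c.1 (m : Int) = c.1 then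
            let r := pvBest Y fuel (PySem.Int.bxor (m : Int) c.1) st.2
            let v := r.1 + c.2
            (if v > st.1 then v else st.1, r.2)
          else st) st).1 =
        L.foldl (fun best c =>
          if PySem.Int.band c.1 (m : Int) = c.1 then
            let v := PySem.List.pyGetD out (PySem.Int.bxor (m : Int) c.1) 0 + c.2
            if v > best then v else best
          else best) st.1 ∧
      pvInv T out (L.foldl (fun (st : Int × PySem.Dict Int Int) c =>
          if PySem.Int.band c.1 (m : Int) = c.1 then
            let r := pvBest Y fuel (PySem.Int.bxor (m : Int) c.1) st.2
            let v := r.1 + c.2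
            (if v > st.1 then v else st.1, r.2)
          else st) st).2 := by
  induction L with
  | nil => intro st hst; exact ⟨rfl, hst⟩
  | cons c L ihL =>
    intro st hst
    have hlc : pvLowIdx c.1 = (k : Int) := hL c (List.mem_cons_self ..)
    have hL' : ∀ c ∈ L, pvLowIdx c.1 = (k : Int) := fun c hc => hL c (List.mem_cons_of_mem _ hc)
    by_cases hg : PySem.Int.band c.1 (m : Int) = c.1
    · obtain ⟨cn, hceq, hcn0, hcnsub⟩ := pv_guard_spec c.1 m k hg hlc
      have hx : m ^^^ cn < m := pv_xor_lt cn m hcnsub hcn0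
      have hIH := IH (m ^^^ cn) st.2 (by omega) (by omega) hst
      have hbx : PySem.Int.bxor (m : Int) c.1 = ((m ^^^ cn : Nat) : Int) := by
        rw [hceq, PySem.Int.bxor_natCast]
      simp only [List.foldl_cons, if_pos hg, hbx, PySem.List.pyGetD_natCast]
      have := ihL hL' (⟨if (pvBest Y fuel ((m ^^^ cn : Nat) : Int) st.2).1 + c.2 > st.1
          then (pvBest Y fuel ((m ^^^ cn : Nat) : Int) st.2).1 + c.2 else st.1,
          (pvBest Y fuel ((m ^^^ cn : Nat) : Int) st.2).2⟩) hIH.2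
      refine ⟨?_, this.2⟩
      rw [this.1, hIH.1]
    · simp only [List.foldl_cons, if_neg hg]
      exact ihL hL' st hst

theorem pv_best_spec (n : Int) (candidates : List (Int × Int × String)) :
    ∀ (fuel m : Nat) (memo : PySem.Dict Int Int), m < pvT n → m ≤ fuel →
      pvInv (pvT n) (solve_max n candidates) memo →
      (pvBest (pvY candidates) fuel (m : Int) memo).1 = (solve_max n candidates).getD m 0 ∧
        pvInv (pvT n) (solve_max n candidates) (pvBest (pvY candidates) fuel (m : Int) memo).2 := by
  intro fuel
  induction fuel with
  | zero =>
    intro m memo hmT hmf hinv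
    have hm0 : m = 0 := by omega
    subst hm0
    simp only [pvBest, Nat.cast_zero]
    exact ⟨(pv_out_zero n candidates).symm, hinv⟩
  | succ fuel ih =>
    intro m memo hmT hmf hinv
    by_cases hm0 : m = 0
    · subst hm0
      simp only [pvBest, Nat.cast_zero]
      exact ⟨(pv_out_zero n candidates).symm, hinv⟩
    · have hmz : ((m : Int) ≠ 0) := by exact_mod_cast hm0
      rcases hget : memo.get? (m : Int) with _ | v
      · -- memo miss: compute
        obtain ⟨k, hpiv, hband, hsub⟩ := pv_lowIdx_spec m hm0
        have hxk : m ^^^ 2 ^ k < m := pv_xor_lt _ _ hsub (by positivity)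
        simp only [pvBest, if_neg hmz, hget]
        have hsk := ih (m ^^^ 2 ^ k) memo (by omega) (by omega) hinv
        rw [pv_read_index m k hpiv]
        have hmem : ∀ c ∈ (pvY candidates).getD (pvLowIdx (m : Int)) [],
            pvLowIdx c.1 = (k : Int) := by
          intro c hc
          rw [pv_mem_byLow candidates _ c hc, hpiv]
        have hfold := pv_fold_spec (pvY candidates) (pvT n) (solve_max n candidates)
          fuel ih m k hmT (by omega)
          ((pvY candidates).getD (pvLowIdx (m : Int)) []) hmem
          (pvBest (pvY candidates) fuel ((m ^^^ 2 ^ k : Nat) : Int) memo) hsk.2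
        refine ⟨?_, ?_⟩
        · rw [hfold.1]
          have hrec := pv_rec n candidates m (by omega) hmT
          rw [hrec]
          unfold pvStepVal
          rw [pv_read_index m k hpiv, PySem.List.pyGetD_natCast, hsk.1]
        · intro kk v hkv
          rw [PySem.Dict.get?_insert] at hkv
          by_cases hkk : kk = (m : Int)
          · rw [if_pos hkk] at hkv
            refine ⟨m, hkk, hmT, ?_⟩
            have hv : v = _ := (Option.some_injective _ hkv).symm
            rw [hv, hfold.1]
            have hrec := pv_rec n candidates m (by omega) hmT
            rw [hrec]
            unfold pvStepVal
            rw [pv_read_index m k hpiv, PySem.List.pyGetD_natCast, hsk.1]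
          · rw [if_neg hkk] at hkv
            exact hfold.2 kk v hkv
      · -- memo hit
        simp only [pvBest, if_neg hmz, hget]
        obtain ⟨j, hj1, hj2, hj3⟩ := hinv (m : Int) v hget
        have hjm : j = m := by exact_mod_cast hj1.symm
        subst hjm
        exact ⟨hj3, hinv⟩

-- ---- top level ----

theorem pv_run_spec (n : Int) (candidates : List (Int × Int × String)) :
    ∀ (ks : List Nat) (acc : List Int) (memo : PySem.Dict Int Int),
      (∀ j ∈ ks, j < pvT n) → pvInv (pvT n) (solve_max n candidates) memo →
      ((ks.map (fun (j : Nat) => (j : Int))).foldl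
          (fun (acc : List Int × PySem.Dict Int Int) mask =>
            let r := pvBest (pvY candidates) mask.toNat mask acc.2
            (acc.1 ++ [r.1], r.2)) (acc, memo)).1 =
        acc ++ ks.map (fun j => (solve_max n candidates).getD j 0) := by
  intro ks
  induction ks with
  | nil => intro acc memo _ _; simp
  | cons j ks ih =>
    intro acc memo hks hinv
    have hspec := pv_best_spec n candidates j j memo (hks j (List.mem_cons_self ..))
      (Nat.le_refl j) hinv
    rw [List.map_cons, List.foldl_cons]
    simp only [Int.toNat_natCast]
    have hih := ih (acc ++ [(pvBest (pvY candidates) j (j : Int) memo).1])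
        (pvBest (pvY candidates) j (j : Int) memo).2
        (fun j hj => hks j (List.mem_cons_of_mem _ hj)) hspec.2
    exact hih.trans (by rw [List.append_assoc, hspec.1]; rfl)

theorem pv_alt_eq (n : Int) (candidates : List (Int × Int × String)) :
    solve_max_alt n candidates =
      (List.range (pvT n)).map (fun j => (solve_max n candidates).getD j 0) := by
  unfold solve_max_alt
  rw [pv_byLowB_eq]
  have hY : (candidates.foldl
      (fun d c => d.modify (pvLowIdx c.1) [] (· ++ [(c.1, c.2.1)]))
      PySem.Dict.empty) = pvY candidates := rfl
  rw [hY, pv_shl_one]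
  show ((PySem.List.pyRange 0 ((pvT n : Nat) : Int) 1).foldl
      (fun (acc : List Int × PySem.Dict Int Int) mask =>
        let r := pvBest (pvY candidates) mask.toNat mask acc.2
        (acc.1 ++ [r.1], r.2)) ([], PySem.Dict.empty)).1 = _
  rw [PySem.List.pyRange_zero_nat]
  rw [pv_run_spec n candidates (List.range (pvT n)) [] PySem.Dict.empty
    (fun j hj => List.mem_range.mp hj)
    (fun kk v h => by rw [PySem.Dict.get?_empty] at h; cases h)]
  simp

-- ===== VERDICT (by name: the statement is the Claim_ definition above) =====
theorem solve_max_spec : Claim_equal_solve_max := by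
  intro n candidates _hdom _hpre
  unfold Spec_solve_max
  rw [pv_alt_eq]
  refine List.ext_getElem ?_ ?_
  · rw [pv_out_length, List.length_map, List.length_range]
  · intro i h1 h2
    rw [List.getElem_map, List.getElem_range, List.getD_eq_getElem _ _ h1]
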